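-- pv_equiv track=rewrite | github.com/Sakamotto/IFES_Prog2 | Programas/libplnbsi.py | separaPalComParametro
-- ===== SOURCE A (Python) =====
-- def separaPalComParametro(pTexto, strSeparadores):
-- 	strBuffer = ""
-- 	lstPalavras = []
--
-- 	for i in range(len(pTexto)):
-- 		if pTexto[i] not in strSeparadores:
-- 			strBuffer += pTexto[i]
-- 		elif strBuffer != "":
-- 			lstPalavras.append(strBuffer)
-- 			strBuffer = ""
-- 		#
-- 	#
-- 	if strBuffer != "":
-- 		lstPalavras.append(strBuffer)
-- 	#
-- 	return lstPalavras
-- ===== SOURCE B (Python) =====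
-- from itertools import groupby
--
-- def separaPalComParametro(pTexto, strSeparadores):
--     return [''.join(g)
--             for isSep, g in groupby(pTexto, key=lambda c: c in strSeparadores)
--             if not isSep]
-- ===== Notes on version B (the rewrite author's own statement) =====
-- stated objective: idiomatic
-- what changed: Replaces the manual buffer/flush state machine with itertools.groupby runs classified as separator/non-separator, joining and keeping only the non-separator runs.
import Mathlib
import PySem

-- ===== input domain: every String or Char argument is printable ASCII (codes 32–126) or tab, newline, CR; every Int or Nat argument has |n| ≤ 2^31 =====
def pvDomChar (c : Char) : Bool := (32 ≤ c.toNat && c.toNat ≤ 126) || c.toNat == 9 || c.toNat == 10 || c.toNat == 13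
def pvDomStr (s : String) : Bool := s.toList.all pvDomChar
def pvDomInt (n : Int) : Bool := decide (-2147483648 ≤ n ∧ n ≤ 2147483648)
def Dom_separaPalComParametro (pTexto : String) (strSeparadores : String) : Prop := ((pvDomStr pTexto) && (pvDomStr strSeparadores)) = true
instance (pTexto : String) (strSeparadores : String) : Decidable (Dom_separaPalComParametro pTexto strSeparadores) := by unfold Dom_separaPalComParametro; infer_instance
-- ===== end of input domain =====

-- B replaces A's manual buffer/flush state machine by grouping the text into
-- maximal runs of separator / non-separator characters and keeping the
-- non-separator runs (idiomatic; itertools.groupby in Python).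

-- ===== PORT A =====
-- A's loop: buffer of pending non-separator chars (string, modelled as its char list),
-- accumulator of finished words; flush buffer on separator and once at the end.
def sepLoopA (sep : List Char) : List Char → List Char → List String → List String
  | [], buf, acc => if buf ≠ [] then acc ++ [String.ofList buf] else acc
  | c :: rest, buf, acc =>
    if ¬ sep.contains c then sepLoopA sep rest (buf ++ [c]) acc
    else if buf ≠ [] then sepLoopA sep rest [] (acc ++ [String.ofList buf])
    else sepLoopA sep rest buf acc

def separaPalComParametro (pTexto : String) (strSeparadores : String) : List String :=
  sepLoopA strSeparadores.toList pTexto.toList [] []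

-- ===== PORT B =====
-- itertools.groupby: split into maximal runs of equal key (key c = "c is a separator").
def pvRuns (key : Char → Bool) : List Char → List (Bool × List Char)
  | [] => []
  | c :: cs =>
    (key c, c :: cs.takeWhile (fun d => key d == key c)) ::
      pvRuns key (cs.dropWhile (fun d => key d == key c))
termination_by cs => cs.length
decreasing_by
  exact Nat.lt_succ_of_le (List.length_dropWhile_le _ _)

-- the comprehension: join each run, keep it iff its key is False
def separaPalComParametro_alt (pTexto : String) (strSeparadores : String) : List String :=
  (pvRuns (fun c => strSeparadores.toList.contains c) pTexto.toList).filterMap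
    (fun p => if p.1 then none else some (String.ofList p.2))

-- ===== PRECONDITION & SPEC =====
def Spec_separaPalComParametro (pTexto : String) (strSeparadores : String) (out : List String) : Prop := out = separaPalComParametro_alt pTexto strSeparadores
instance (pTexto : String) (strSeparadores : String) (out : List String) : Decidable (Spec_separaPalComParametro pTexto strSeparadores out) := by unfold Spec_separaPalComParametro; infer_instance

-- ===== CLAIM (what is proved, stated in full; the proofs are below) =====
def Claim_equal_separaPalComParametro : Prop := ∀ (pTexto : String) (strSeparadores : String), Dom_separaPalComParametro pTexto strSeparadores → Spec_separaPalComParametro pTexto strSeparadores (separaPalComParametro pTexto strSeparadores)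

-- ===== LEMMAS AND PROOFS =====

-- B's result as a function of the char list
def wordsB (key : Char → Bool) (cs : List Char) : List String :=
  (pvRuns key cs).filterMap (fun p => if p.1 then none else some (String.ofList p.2))

theorem wordsB_alt (pTexto strSeparadores : String) :
    separaPalComParametro_alt pTexto strSeparadores
      = wordsB (fun c => strSeparadores.toList.contains c) pTexto.toList := rfl

theorem pred_of_true {key : Char → Bool} {b : Char} (hb : key b = true) :
    (fun d => key d == key b) = key := funext fun d => by simp [hb]

theorem pred_of_false {key : Char → Bool} {b : Char} (hb : key b = false) :
    (fun d => key d == key b) = (fun d => !key d) := funext fun d => by simp [hb]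

-- dropping a leading block of separator characters does not change the words
theorem wordsB_dropWhile (key : Char → Bool) :
    ∀ cs : List Char, wordsB key (cs.dropWhile key) = wordsB key cs := by
  intro cs
  induction cs with
  | nil => rfl
  | cons d ds ih =>
    by_cases hd : key d = true
    · have h1 : (d :: ds).dropWhile key = ds.dropWhile key := by
        rw [List.dropWhile_cons, if_pos hd]
      have h2 : wordsB key (d :: ds) = wordsB key (ds.dropWhile key) := by
        simp only [wordsB, pvRuns]
        rw [pred_of_true hd, List.filterMap_cons]
        simp [hd]
      rw [h1, h2]
    · rw [List.dropWhile_cons, if_neg hd]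

-- a leading separator character does not change the words
theorem wordsB_cons_sep (key : Char → Bool) (c : Char) (cs : List Char)
    (hc : key c = true) : wordsB key (c :: cs) = wordsB key cs := by
  have h2 : wordsB key (c :: cs) = wordsB key (cs.dropWhile key) := by
    simp only [wordsB, pvRuns]
    rw [pred_of_true hc, List.filterMap_cons]
    simp [hc]
  rw [h2, wordsB_dropWhile]

theorem takeWhile_nonsep (key : Char → Bool) (c : Char) (cs : List Char)
    (hc : key c = true) :
    ∀ bs : List Char, (∀ x ∈ bs, key x = false) →
      (bs ++ c :: cs).takeWhile (fun d => !key d) = bs := by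
  intro bs
  induction bs with
  | nil => intro _; simp [hc]
  | cons e es ih =>
    intro hall
    have he : key e = false := hall e (by simp)
    simp only [List.cons_append, List.takeWhile_cons, he]
    simp [ih (fun x hx => hall x (by simp [hx]))]

theorem dropWhile_nonsep (key : Char → Bool) (c : Char) (cs : List Char)
    (hc : key c = true) :
    ∀ bs : List Char, (∀ x ∈ bs, key x = false) →
      (bs ++ c :: cs).dropWhile (fun d => !key d) = c :: cs := by
  intro bs
  induction bs with
  | nil => intro _; simp [hc]
  | cons e es ih =>
    intro hall
    have he : key e = false := hall e (by simp)
    simp only [List.cons_append, List.dropWhile_cons, he]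
    simp [ih (fun x hx => hall x (by simp [hx]))]

-- a maximal non-separator prefix followed by a separator is the first word
theorem wordsB_word_prefix (key : Char → Bool) :
    ∀ (pref : List Char) (c : Char) (cs : List Char),
      pref ≠ [] → (∀ x ∈ pref, key x = false) → key c = true →
      wordsB key (pref ++ c :: cs) = String.ofList pref :: wordsB key cs := by
  intro pref c cs hne hall hc
  match pref with
  | [] => exact absurd rfl hne
  | b :: bs =>
    have hb : key b = false := hall b (by simp)
    have hbs : ∀ x ∈ bs, key x = false := fun x hx => hall x (by simp [hx])
    have step : wordsB key ((b :: bs) ++ c :: cs)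
        = String.ofList (b :: bs) :: wordsB key (c :: cs) := by
      simp only [wordsB, List.cons_append, pvRuns]
      rw [pred_of_false hb, takeWhile_nonsep key c cs hc bs hbs,
          dropWhile_nonsep key c cs hc bs hbs, List.filterMap_cons]
      simp [pvRuns, hb]
    rw [step, wordsB_cons_sep key c cs hc]

-- wordsB of an all-non-separator list is the single word (or nothing if empty)
theorem wordsB_all_nonsep (key : Char → Bool) (buf : List Char)
    (hall : ∀ x ∈ buf, key x = false) :
    wordsB key buf = if buf ≠ [] then [String.ofList buf] else [] := by
  match buf with
  | [] => simp [wordsB, pvRuns]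
  | b :: bs =>
    have hb : key b = false := hall b (by simp)
    have hbs : ∀ x ∈ bs, key x = false := fun x hx => hall x (by simp [hx])
    have htake : bs.takeWhile (fun d => !key d) = bs :=
      List.takeWhile_eq_self_iff.mpr (fun x hx => by simp [hbs x hx])
    have hdrop : bs.dropWhile (fun d => !key d) = [] :=
      List.dropWhile_eq_nil_iff.mpr (fun x hx => by simp [hbs x hx])
    simp only [wordsB, pvRuns]
    rw [pred_of_false hb, htake, hdrop]
    simp [pvRuns, hb]

-- the loop invariant: A's loop with pending buffer buf (all non-separator)
-- produces acc followed by the words of buf ++ cs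
theorem sepLoopA_invariant (sep : List Char) :
    ∀ (cs buf : List Char) (acc : List String),
      (∀ x ∈ buf, sep.contains x = false) →
      sepLoopA sep cs buf acc = acc ++ wordsB (fun c => sep.contains c) (buf ++ cs) := by
  intro cs
  induction cs with
  | nil =>
    intro buf acc hall
    simp only [sepLoopA, List.append_nil]
    rw [wordsB_all_nonsep _ buf hall]
    split <;> simp
  | cons c rest ih =>
    intro buf acc hall
    by_cases hc : sep.contains c = true
    · have hcm : c ∈ sep := by simpa using hc
      by_cases hbuf : buf = []
      · subst hbuf
        rw [show sepLoopA sep (c :: rest) [] acc = sepLoopA sep rest [] acc from by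
              simp [sepLoopA, hcm],
            ih [] acc (by simp), List.nil_append, List.nil_append,
            wordsB_cons_sep _ c rest hc]
      · rw [show sepLoopA sep (c :: rest) buf acc
              = sepLoopA sep rest [] (acc ++ [String.ofList buf]) from by
              simp [sepLoopA, hcm, hbuf],
            ih [] (acc ++ [String.ofList buf]) (by simp), List.nil_append,
            wordsB_word_prefix _ buf c rest hbuf hall hc, List.append_assoc,
            List.singleton_append]
    · have hc' : sep.contains c = false := by simpa using hc
      have hcm : c ∉ sep := by simpa using hc
      rw [show sepLoopA sep (c :: rest) buf acc = sepLoopA sep rest (buf ++ [c]) acc from by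
            simp [sepLoopA, hcm],
          ih (buf ++ [c]) acc (by
            intro x hx
            rcases List.mem_append.mp hx with h | h
            · exact hall x h
            · simp at h; subst h; exact hc'),
          List.append_assoc, List.singleton_append]

-- ===== VERDICT (by name: the statement is the Claim_ definition above) =====
theorem separaPalComParametro_spec : Claim_equal_separaPalComParametro := by
  intro pTexto strSeparadores _
  show separaPalComParametro pTexto strSeparadores = separaPalComParametro_alt pTexto strSeparadores
  rw [wordsB_alt, separaPalComParametro,
      sepLoopA_invariant strSeparadores.toList pTexto.toList [] [] (by simp),
      List.nil_append, List.nil_append]
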